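-- pv_equiv track=rewrite | github.com/panagiotagrosdouli/-_7_- | 1d_caipynb.py | build_rule_table
-- ===== SOURCE A (Python) =====
-- def build_rule_table(rule_number: int, num_states: int = 2) -> dict:
--     """
--     Decode an integer rule number into a neighbourhood → next-state lookup table.
--
--     For binary (k=2) CA this covers Wolfram's 256 elementary rules.
--     For k-ary CA the same decimal encoding is generalised.
--
--     Args:
--         rule_number : Integer encoding of the transition rule.
--         num_states  : Number of distinct cell states (default 2).
--
--     Returns:
--         Dictionary mapping 3-tuple neighbourhood patterns to next states.
--     """
--     rule_table = {}
--     patterns = [(i, j, k)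
--                 for i in range(num_states)
--                 for j in range(num_states)
--                 for k in range(num_states)]
--     # Patterns are ordered from (0,0,0) → (k-1,k-1,k-1)
--     for idx, pattern in enumerate(patterns):
--         rule_table[pattern] = (rule_number // (num_states ** idx)) % num_states
--     return rule_table
-- ===== SOURCE B (Python) =====
-- def build_rule_table(rule_number: int, num_states: int = 2) -> dict:
--     """Decode rule_number into a neighbourhood -> next-state table with one
--     flat loop: peel base-num_states digits with divmod and recover the
--     (i, j, k) pattern from the flat index arithmetically."""
--     rule_table = {}
--     remaining = rule_number
--     sq = num_states * num_states
--     for idx in range(sq * num_states):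
--         remaining, digit = divmod(remaining, num_states)
--         rule_table[(idx // sq, idx // num_states % num_states, idx % num_states)] = digit
--     return rule_table
-- ===== Notes on version B (the rewrite author's own statement) =====
-- stated objective: alternative
-- what changed: Replaces the triple nested pattern loop, the precomputed patterns list and the fresh num_states**idx power per entry by a single flat loop over range(num_states**3) that threads one divmod remainder accumulator and reconstructs the (i,j,k) pattern from the flat index by div/mod arithmetic.
import Mathlib
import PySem

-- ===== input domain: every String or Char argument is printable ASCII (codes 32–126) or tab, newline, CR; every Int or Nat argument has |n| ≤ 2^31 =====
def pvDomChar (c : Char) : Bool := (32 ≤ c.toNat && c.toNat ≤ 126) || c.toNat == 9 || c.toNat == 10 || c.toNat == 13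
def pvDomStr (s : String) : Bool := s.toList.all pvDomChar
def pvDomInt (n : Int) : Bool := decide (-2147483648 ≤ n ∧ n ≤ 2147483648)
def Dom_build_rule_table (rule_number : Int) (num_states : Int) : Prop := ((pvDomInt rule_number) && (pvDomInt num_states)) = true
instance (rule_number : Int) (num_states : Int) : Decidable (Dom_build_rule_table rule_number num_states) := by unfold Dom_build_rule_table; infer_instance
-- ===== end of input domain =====

-- B replaces the triple pattern loop + per-entry power by ONE flat loop that threads a divmod
-- remainder and recovers (i,j,k) from the flat index arithmetically; objective: alternative.
-- The Python dict (pattern triple → state) is rendered per the convention as a flat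
-- List (Int × Int × Int × Int) of (i, j, k, state) in insertion order.

-- ===== PORT A =====
-- exponent idx of enumerate is always ≥ 0, so `s ^ idx.toNat` is exact for Python's `num_states ** idx`
def build_rule_table (rule_number : Int) (num_states : Int) : List (Int × Int × Int × Int) :=
  let patterns : List (Int × Int × Int) :=
    (PySem.List.pyRange 0 num_states 1).flatMap (fun i =>
      (PySem.List.pyRange 0 num_states 1).flatMap (fun j =>
        (PySem.List.pyRange 0 num_states 1).map (fun k => (i, j, k))))
  let d : PySem.Dict (Int × Int × Int) Int :=
    (PySem.List.enumerate patterns 0).foldl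
      (fun d e =>
        d.insert e.2 (PySem.Int.mod (PySem.Int.floordiv rule_number (num_states ^ e.1.toNat)) num_states))
      PySem.Dict.empty
  d.items.map (fun p => (p.1.1, p.1.2.1, p.1.2.2, p.2))

-- ===== PORT B =====
def build_rule_table_alt (rule_number : Int) (num_states : Int) : List (Int × Int × Int × Int) :=
  let sq : Int := num_states * num_states
  let res : PySem.Dict (Int × Int × Int) Int × Int :=
    (PySem.List.pyRange 0 (sq * num_states) 1).foldl
      (fun st idx =>
        -- remaining, digit = divmod(remaining, num_states); pattern from flat index
        (st.1.insert (PySem.Int.floordiv idx sq,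
                      PySem.Int.mod (PySem.Int.floordiv idx num_states) num_states,
                      PySem.Int.mod idx num_states)
                     (PySem.Int.mod st.2 num_states),
         PySem.Int.floordiv st.2 num_states))
      (PySem.Dict.empty, rule_number)
  res.1.items.map (fun p => (p.1.1, p.1.2.1, p.1.2.2, p.2))

-- ===== PRECONDITION & SPEC =====
def Spec_build_rule_table (rule_number : Int) (num_states : Int) (out : List (Int × Int × Int × Int)) : Prop := out = build_rule_table_alt rule_number num_states
instance (rule_number : Int) (num_states : Int) (out : List (Int × Int × Int × Int)) : Decidable (Spec_build_rule_table rule_number num_states out) := by unfold Spec_build_rule_table; infer_instance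

-- ===== CLAIM (what is proved, stated in full; the proofs are below) =====
def Claim_equal_build_rule_table : Prop := ∀ (rule_number : Int) (num_states : Int), Dom_build_rule_table rule_number num_states → Spec_build_rule_table rule_number num_states (build_rule_table rule_number num_states)

-- ===== LEMMAS AND PROOFS =====

-- B's index-arithmetic pattern: the triple recovered from flat index t in base s
def pvPat (s : Int) (t : Int) : Int × Int × Int :=
  (PySem.Int.floordiv t (s * s),
   PySem.Int.mod (PySem.Int.floordiv t s) s,
   PySem.Int.mod t s)

lemma pv_fd_fd (r s : Int) (hs : 1 ≤ s) (n : Nat) :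
    PySem.Int.floordiv (PySem.Int.floordiv r (s ^ n)) s = PySem.Int.floordiv r (s ^ (n + 1)) := by
  have h1 : (0 : Int) < s ^ n := pow_pos (by omega) n
  rw [PySem.Int.floordiv_eq_ediv_of_pos h1, PySem.Int.floordiv_eq_ediv_of_pos (by omega : (0:Int) < s),
      PySem.Int.floordiv_eq_ediv_of_pos (pow_pos (by omega : (0:Int) < s) (n + 1)), pow_succ]
  exact Int.ediv_ediv_of_nonneg (le_of_lt h1)

-- two nested counting loops flatten to one loop over range (a*b) with div/mod index split
lemma pv_flat {α : Type} (b : Nat) (f : Nat → Nat → α) :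
    ∀ (a : Nat),
      (List.range a).flatMap (fun i => (List.range b).map (fun j => f i j))
        = (List.range (a * b)).map (fun t => f (t / b) (t % b)) := by
  intro a
  induction a with
  | zero => simp
  | succ a ih =>
      rw [List.range_succ, List.flatMap_append, ih, Nat.succ_mul, List.range_add,
          List.map_append, List.map_map]
      congr 1
      simp only [List.flatMap_cons, List.flatMap_nil, List.append_nil]
      apply List.map_congr_left
      intro j hj
      have hj' : j < b := List.mem_range.mp hj
      have h1 : (a * b + j) / b = a := by
        rw [Nat.mul_comm, Nat.mul_add_div (by omega), Nat.div_eq_of_lt hj', Nat.add_zero]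
      have h2 : (a * b + j) % b = j := by
        rw [Nat.add_comm, Nat.add_mul_mod_self_right, Nat.mod_eq_of_lt hj']
      simp [Function.comp, h1, h2]

-- the Nat div/mod index split agrees with B's Int-arithmetic pattern reconstruction
lemma pv_pat_split (s' : Nat) (hs' : 0 < s') (t : Nat) :
    ((((t / (s' * s') : Nat)) : Int), (((t % (s' * s') / s' : Nat)) : Int), (((t % (s' * s') % s' : Nat)) : Int))
      = pvPat (s' : Int) (t : Int) := by
  have hp : (0 : Int) < (s' : Int) := by exact_mod_cast hs'
  have hpp : (0 : Int) < (s' : Int) * (s' : Int) := by positivity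
  unfold pvPat
  rw [PySem.Int.floordiv_eq_ediv_of_pos hpp, PySem.Int.floordiv_eq_ediv_of_pos hp,
      PySem.Int.mod_eq_emod_of_pos hp, PySem.Int.mod_eq_emod_of_pos hp,
      Nat.mod_mul_right_div_self t s' s', Nat.mod_mod_of_dvd t ⟨s', rfl⟩]
  refine congrArg₂ Prod.mk ?_ (congrArg₂ Prod.mk ?_ ?_)
  · show ((t / (s' * s') : Nat) : Int) = Int.ediv (t : Int) ((s' : Int) * (s' : Int))
    rw [← Nat.cast_mul]; rfl
  · rfl
  · rfl

-- A's three nested pattern loops are the map of B's index split over one flat range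
lemma pv_patterns (s' : Nat) (hs' : 0 < s') :
    (List.map (fun k : Nat => (k : Int)) (List.range s')).flatMap (fun i =>
      (List.map (fun k : Nat => (k : Int)) (List.range s')).flatMap (fun j =>
        (List.map (fun k : Nat => (k : Int)) (List.range s')).map (fun k => (i, j, k))))
    = List.map (fun t : Nat => pvPat (s' : Int) (t : Int)) (List.range (s' * (s' * s'))) := by
  have inner : ∀ i : Int,
      (List.map (fun k : Nat => (k : Int)) (List.range s')).flatMap (fun j =>
        (List.map (fun k : Nat => (k : Int)) (List.range s')).map (fun k => (i, j, k)))
      = (List.range (s' * s')).map (fun u => (i, ((u / s' : Nat) : Int), ((u % s' : Nat) : Int))) := by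
    intro i
    rw [List.flatMap_map]
    simp only [List.map_map, Function.comp_def]
    exact pv_flat s' (fun j k => (i, ((j : Nat) : Int), ((k : Nat) : Int))) s'
  rw [List.flatMap_map]
  simp only [inner]
  rw [pv_flat (s' * s') (fun i u => (((i : Nat) : Int), ((u / s' : Nat) : Int), ((u % s' : Nat) : Int))) s']
  exact List.map_congr_left (fun t _ => pv_pat_split s' hs' t)

-- A's fold over enumerate of a range-map is the plain range fold
lemma pv_enumA (r s : Int) (f : Nat → Int × Int × Int) :
    ∀ (m : Nat) (d : PySem.Dict (Int × Int × Int) Int),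
      (PySem.List.enumerate ((List.range m).map f) 0).foldl
        (fun d e => d.insert e.2 (PySem.Int.mod (PySem.Int.floordiv r (s ^ e.1.toNat)) s)) d
      = (List.range m).foldl (fun d t => d.insert (f t) (PySem.Int.mod (PySem.Int.floordiv r (s ^ t)) s)) d := by
  intro m
  induction m with
  | zero => intro d; simp [PySem.List.enumerate_nil]
  | succ m ih =>
      intro d
      rw [List.range_succ, List.map_append, PySem.List.enumerate_append,
          List.foldl_append, ih, List.foldl_append]
      simp [PySem.List.enumerate_cons, PySem.List.enumerate_nil]

-- B's threaded-remainder flat fold is the same plain range fold (plus the final remainder)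
lemma pv_Bfold (r s : Int) (hs : 1 ≤ s) (g : Int → Int × Int × Int) :
    ∀ (m : Nat) (d : PySem.Dict (Int × Int × Int) Int),
      (List.map (fun k : Nat => (k : Int)) (List.range m)).foldl
        (fun st idx => (st.1.insert (g idx) (PySem.Int.mod st.2 s), PySem.Int.floordiv st.2 s))
        (d, r)
      = ((List.range m).foldl (fun d t => d.insert (g (t : Int)) (PySem.Int.mod (PySem.Int.floordiv r (s ^ t)) s)) d,
         PySem.Int.floordiv r (s ^ m)) := by
  intro m
  induction m with
  | zero => intro d; simp [PySem.Int.floordiv]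
  | succ m ih =>
      intro d
      rw [List.range_succ, List.map_append, List.foldl_append, List.foldl_append, ih]
      simp only [List.map_cons, List.map_nil, List.foldl_cons, List.foldl_nil]
      rw [pv_fd_fd r s hs m]

lemma pv_pyRange_cast (s : Int) :
    PySem.List.pyRange 0 s 1 = List.map (fun k : Nat => (k : Int)) (List.range s.toNat) := by
  rw [PySem.List.pyRange_one]
  simp only [sub_zero, zero_add]

-- ===== VERDICT (by name: the statement is the Claim_ definition above) =====
theorem build_rule_table_spec : Claim_equal_build_rule_table := by
  intro r s _
  unfold Spec_build_rule_table
  simp only [build_rule_table, build_rule_table_alt]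
  by_cases hs : 1 ≤ s
  · have hs0 : (0 : Int) ≤ s := by omega
    obtain ⟨s', rfl⟩ : ∃ s' : Nat, s = (s' : Int) := ⟨s.toNat, (Int.toNat_of_nonneg hs0).symm⟩
    have hs'pos : 0 < s' := by exact_mod_cast hs
    rw [pv_pyRange_cast, Int.toNat_natCast,
        show ((s' : Int) * (s' : Int) * (s' : Int)) = ((s' * (s' * s') : Nat) : Int) from by push_cast; ring,
        pv_pyRange_cast, Int.toNat_natCast,
        pv_patterns s' hs'pos, pv_enumA,
        pv_Bfold r (s' : Int) (by exact_mod_cast hs) (fun idx =>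
          (PySem.Int.floordiv idx ((s' : Int) * (s' : Int)),
           PySem.Int.mod (PySem.Int.floordiv idx (s' : Int)) (s' : Int),
           PySem.Int.mod idx (s' : Int)))]
    rfl
  · -- num_states ≤ 0 : both ranges are empty, both sides are the empty table
    have hA : PySem.List.pyRange 0 s 1 = [] := PySem.List.pyRange_one_eq_nil (by omega)
    have hB : PySem.List.pyRange 0 (s * s * s) 1 = [] := by
      apply PySem.List.pyRange_one_eq_nil
      nlinarith [mul_self_nonneg s]
    rw [hA, hB]
    simp [PySem.List.enumerate_nil]
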